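-- pv_equiv track=rewrite | github.com/Awiomanik/Advent_of_Code_2023 | Solutions/2023/Day05/EVENT.py | get_mappings_dicts
-- ===== SOURCE A (Python) =====
-- def get_mappings_dicts(d):
--     '''
--     Gets mappings data from data list of strings
--     Returns list of subsequent mapping lists of ranges dicts
--             [[{'source': #, 'destination': #, 'length': #}, ...], ...]
--     '''
--     # start after seeds and empty row
--     maps_temp = d[2:]
--     maps_final = []
--     mapping_ranges = []
--
--     for range in maps_temp:
--         if range != '':
--             mapping_ranges.append(range)
--         else:
--             maps_final.append(mapping_ranges)
--             mapping_ranges = []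
--
--     # maps final contains list of lists of strings describing mappings ranges
--     maps_final.append(mapping_ranges)
--
--     # discard description strings and convert strings into dicts
--     return [[{'source': int((sp := span.split(' '))[1]), \
--               'destination': int(sp[0]), \
--               'length': int(sp[2])} \
--                 for span in m] \
--                 for m in [line[1:] for line in maps_final]]
-- ===== SOURCE B (Python) =====
-- def get_mappings_dicts(d):
--     # Single pass over d[2:]: group and parse in one loop with a seen_header flag
--     result = []
--     current = []
--     seen_header = False
--     for line in d[2:]:
--         if line == '':
--             result.append(current)
--             current = []
--             seen_header = False
--         elif not seen_header:
--             seen_header = True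
--         else:
--             sp = line.split(' ')
--             current.append({'source': int(sp[1]), 'destination': int(sp[0]), 'length': int(sp[2])})
--     result.append(current)
--     return result
-- ===== Notes on version B (the rewrite author's own statement) =====
-- stated objective: simpler
-- what changed: Replaces A's two-phase structure (group lines by blanks into string lists, then a nested comprehension that drops each group's header and parses the rest) with a single pass over d[2:] that groups and parses in one loop using a seen_header flag, building the dicts directly.
-- outside the precondition, e.g. on get_mappings_dicts(['s', '', 'hdr', 'a b c']): A raises ValueError, B raises ValueError; on get_mappings_dicts(['s', '', 'hdr', '1 2']): A raises IndexError, B raises IndexError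
import Mathlib
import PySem

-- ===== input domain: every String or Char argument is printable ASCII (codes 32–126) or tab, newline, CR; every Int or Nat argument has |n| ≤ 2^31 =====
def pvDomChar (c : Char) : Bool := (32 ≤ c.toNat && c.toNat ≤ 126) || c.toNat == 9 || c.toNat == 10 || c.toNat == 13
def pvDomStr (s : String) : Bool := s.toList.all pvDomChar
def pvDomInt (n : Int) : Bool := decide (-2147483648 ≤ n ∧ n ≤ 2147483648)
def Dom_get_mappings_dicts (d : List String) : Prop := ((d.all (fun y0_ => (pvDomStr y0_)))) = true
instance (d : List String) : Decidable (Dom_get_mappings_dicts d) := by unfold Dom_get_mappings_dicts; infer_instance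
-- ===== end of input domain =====

-- B replaces A's two phases (group lines by blanks, then a nested comprehension that
-- drops each group's header and parses) with one pass that groups and parses as it goes,
-- using a seen_header flag; objective: simpler (one traversal, no intermediate string groups).

-- ===== PORT A =====
-- {'source': int(sp[1]), 'destination': int(sp[0]), 'length': int(sp[2])} for sp = span.split(' ');
-- out-of-range sp[i] / non-int tokens raise in Python and are excluded by Pre_ (getD defaults are never the value A returns).
def pvSpan (span : String) : List (String × Int) :=
  let sp : List String := (PySem.Str.split? span " ").getD []
  [("source", (PySem.Int.ofStr? (sp.getD 1 "")).getD 0),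
   ("destination", (PySem.Int.ofStr? (sp.getD 0 "")).getD 0),
   ("length", (PySem.Int.ofStr? (sp.getD 2 "")).getD 0)]

-- body of A's for-loop: state = (maps_final, mapping_ranges)
def pvStepA (st : List (List String) × List String) (r : String) :
    List (List String) × List String :=
  if r ≠ "" then (st.1, st.2 ++ [r]) else (st.1 ++ [st.2], ([] : List String))

def get_mappings_dicts (d : List String) : List (List (List (String × Int))) :=
  let maps_temp := PySem.List.slice d (some 2) none
  let st := maps_temp.foldl pvStepA ([], [])
  let maps_final := st.1 ++ [st.2]
  ((maps_final.map (fun line => PySem.List.slice line (some 1) none)).map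
    (fun m => m.map pvSpan))

-- ===== PORT B =====
-- body of B's for-loop: state = (result, current, seen_header)
def pvStepB (st : List (List (List (String × Int))) × List (List (String × Int)) × Bool)
    (line : String) :
    List (List (List (String × Int))) × List (List (String × Int)) × Bool :=
  if line = "" then (st.1 ++ [st.2.1], ([] : List (List (String × Int))), false)
  else if !st.2.2 then (st.1, st.2.1, true)
  else (st.1, st.2.1 ++ [pvSpan line], true)

def get_mappings_dicts_alt (d : List String) : List (List (List (String × Int))) :=
  let st := (d.drop 2).foldl pvStepB ([], [], false)
  st.1 ++ [st.2.1]

-- ===== PRECONDITION & SPEC =====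
-- pvLineOk s: s.split(' ') has tokens 0,1,2 and all three are valid Python ints
def pvLineOk (s : String) : Bool :=
  let sp : List String := (PySem.Str.split? s " ").getD []
  decide (3 ≤ sp.length) && (PySem.Int.ofStr? (sp.getD 0 "")).isSome
    && (PySem.Int.ofStr? (sp.getD 1 "")).isSome && (PySem.Int.ofStr? (sp.getD 2 "")).isSome

-- Pre_ excludes exactly the inputs where Python A raises (IndexError/ValueError): a line of
-- d[2:] is parsed iff it is nonempty and its immediate predecessor is nonempty (i.e. it is
-- not a group header); every such line must split into ≥3 tokens whose first three are ints.
def Pre_get_mappings_dicts (d : List String) : Prop :=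
  (((d.drop 2).zip (d.drop 3)).all (fun p => p.1 == "" || p.2 == "" || pvLineOk p.2)) = true
instance (d : List String) : Decidable (Pre_get_mappings_dicts d) := by
  unfold Pre_get_mappings_dicts; infer_instance

def pvWitness_get_mappings_dicts : List String :=
  ["seeds: 79 14", "", "seed-to-soil map:", "50 98 2", "52 50 48", "", "soil map:", "0 15 37"]

def Spec_get_mappings_dicts (d : List String) (out : List (List (List (String × Int)))) : Prop :=
  out = get_mappings_dicts_alt d
instance (d : List String) (out : List (List (List (String × Int)))) :
    Decidable (Spec_get_mappings_dicts d out) := by unfold Spec_get_mappings_dicts; infer_instance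

-- ===== CLAIM (what is proved, stated in full; the proofs are below) =====
def Claim_equal_get_mappings_dicts : Prop :=
  ∀ (d : List String), Dom_get_mappings_dicts d → Pre_get_mappings_dicts d →
    Spec_get_mappings_dicts d (get_mappings_dicts d)

-- ===== LEMMAS AND PROOFS =====

-- what A's second phase makes of one group of raw lines
def pvGroup (g : List String) : List (List (String × Int)) := (g.drop 1).map pvSpan

theorem pvGroup_append_of_ne_nil (g : List String) (r : String) (h : g ≠ []) :
    pvGroup (g ++ [r]) = pvGroup g ++ [pvSpan r] := by
  cases g with
  | nil => exact absurd rfl h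
  | cons x xs => simp [pvGroup]

-- loop invariant: B's fold state mirrors A's fold state through pvGroup
theorem pvLoop (t : List String) : ∀ (F : List (List String)) (cur : List String),
    t.foldl pvStepB (F.map pvGroup, pvGroup cur, decide (cur ≠ [])) =
      ((t.foldl pvStepA (F, cur)).1.map pvGroup,
       pvGroup (t.foldl pvStepA (F, cur)).2,
       decide ((t.foldl pvStepA (F, cur)).2 ≠ [])) := by
  induction t with
  | nil => intro F cur; simp
  | cons r rs ih =>
    intro F cur
    by_cases hr : r = ""
    · subst hr
      have : pvStepB (F.map pvGroup, pvGroup cur, decide (cur ≠ [])) "" =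
          ((F ++ [cur]).map pvGroup, pvGroup [], decide (([] : List String) ≠ [])) := by
        simp [pvStepB, pvGroup]
      simp only [List.foldl_cons, this, ih, pvStepA]
      simp
    · by_cases hc : cur = []
      · subst hc
        have : pvStepB (F.map pvGroup, pvGroup [], decide (([] : List String) ≠ [])) r =
            (F.map pvGroup, pvGroup [r], decide ([r] ≠ ([] : List String))) := by
          simp [pvStepB, pvGroup, hr]
        simp only [List.foldl_cons, this, ih, pvStepA]
        simp [hr]
      · have : pvStepB (F.map pvGroup, pvGroup cur, decide (cur ≠ [])) r =
            (F.map pvGroup, pvGroup (cur ++ [r]), decide ((cur ++ [r]) ≠ ([] : List String))) := by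
          simp [pvStepB, hr, hc, pvGroup_append_of_ne_nil cur r hc]
        simp only [List.foldl_cons, this, ih, pvStepA]
        simp [hr]

-- ===== VERDICT (by name: the statement is the Claim_ definition above) =====
theorem get_mappings_dicts_spec : Claim_equal_get_mappings_dicts := by
  intro d _ _
  unfold Spec_get_mappings_dicts get_mappings_dicts get_mappings_dicts_alt
  have hslice2 : PySem.List.slice d (some 2) none = d.drop 2 := by
    rw [show ((2 : Int) = ((2 : Nat) : Int)) from rfl, PySem.List.slice_from_natCast]
  simp only [hslice2]
  rw [show (([] : List (List (List (String × Int)))), ([] : List (List (String × Int))), false) =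
      (([] : List (List String)).map pvGroup, pvGroup [], decide (([] : List String) ≠ [])) by
    simp [pvGroup]]
  rw [pvLoop (d.drop 2) [] []]
  rw [List.map_map,
    show ((fun m => List.map pvSpan m) ∘ fun line => PySem.List.slice line (some 1) none) = pvGroup
      from funext fun g => by simp [pvGroup, PySem.List.slice_from_one, List.drop_one, Function.comp]]
  simp
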